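-- pv_equiv track=rewrite | github.com/lugazdik/AoC_2019 | day04/day04.py | first_task
-- ===== SOURCE A (Python) =====
-- def first_task(lower_bound, upper_bound):
--     result = []
--     for i in range(lower_bound, upper_bound):
--         array = []
--         for digit in str(i):
--             array.append(int(digit))
--         found_double = False
--         valid = True
--         for j in range(len(array) - 1):
--             if array[j] == array[j+1]:
--                 found_double = True
--             if array[j] > array[j+1]:
--                 valid = False
--                 break
--         if valid and found_double:
--             result.append(i)
--     return result
-- ===== SOURCE B (Python) =====
-- def _nondec(d, lo):
--     # all non-decreasing digit sequences of length d with digits in [lo, 9], in lex order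
--     if d == 0:
--         return [[]]
--     return [[x] + rest for x in range(lo, 10) for rest in _nondec(d - 1, x)]
--
--
-- def first_task(lower_bound, upper_bound):
--     # Enumerate candidates (non-decreasing digit strings containing an adjacent
--     # double) directly instead of scanning the whole numeric range.
--     if upper_bound <= lower_bound:
--         return []
--     hi = upper_bound - 1
--     ndigits = len(str(hi))
--     result = []
--     for d in range(2, ndigits + 1):
--         for seq in _nondec(d, 1):
--             if any(a == b for a, b in zip(seq, seq[1:])):
--                 v = 0
--                 for x in seq:
--                     v = 10 * v + x
--                 if lower_bound <= v < upper_bound: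
--                     result.append(v)
--     return result
-- ===== Notes on version B (the rewrite author's own statement) =====
-- stated objective: faster
-- what changed: Instead of scanning every integer in [lower_bound, upper_bound) and testing its digit string, B enumerates exactly the non-decreasing digit sequences (first digit >= 1) that contain an adjacent double, in increasing order of value, and keeps those whose value falls in the bounds.
import Mathlib
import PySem

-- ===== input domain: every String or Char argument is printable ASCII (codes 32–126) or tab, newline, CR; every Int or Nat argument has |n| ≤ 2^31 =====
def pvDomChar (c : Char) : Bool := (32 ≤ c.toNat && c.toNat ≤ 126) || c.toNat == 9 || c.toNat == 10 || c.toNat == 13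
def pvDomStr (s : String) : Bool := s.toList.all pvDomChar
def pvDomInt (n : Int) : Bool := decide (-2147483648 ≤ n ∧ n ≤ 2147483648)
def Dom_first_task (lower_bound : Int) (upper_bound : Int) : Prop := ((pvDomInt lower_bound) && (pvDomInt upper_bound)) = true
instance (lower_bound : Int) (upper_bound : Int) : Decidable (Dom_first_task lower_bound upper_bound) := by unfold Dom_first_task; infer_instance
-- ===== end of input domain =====

-- B enumerates only the candidate numbers (non-decreasing digit sequences containing an
-- adjacent double) instead of scanning the whole numeric range; measurably faster.

-- ===== PORT A =====
-- int(digit) for one character of str(i); total form, used only under Pre_ (digit characters).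
def pvIntOfDigit (c : Char) : Int := (PySem.Int.ofChars? [c]).getD 0

-- the j-loop 'for j in range(len(array)-1)' with the found_double/valid flags and the break
def pvJLoop (array : List Int) : List Int → Bool → Bool × Bool
  | [], fd => (fd, true)
  | j :: js, fd =>
    let fd' := if PySem.List.pyGetD array j 0 == PySem.List.pyGetD array (j + 1) 0 then true else fd
    if PySem.List.pyGetD array (j + 1) 0 < PySem.List.pyGetD array j 0 then (fd', false)
    else pvJLoop array js fd'

def first_task (lower_bound : Int) (upper_bound : Int) : List Int :=
  (PySem.List.pyRange lower_bound upper_bound 1).foldl (fun result i =>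
    let array := (PySem.Int.toChars i).foldl (fun a c => a ++ [pvIntOfDigit c]) []
    let r := pvJLoop array (PySem.List.pyRange 0 (PySem.List.len array - 1) 1) false
    if r.2 && r.1 then result ++ [i] else result) []

-- ===== PORT B =====
-- _nondec(d, lo): all non-decreasing digit sequences of length d with digits in [lo, 9], lex order
def pvNondec : Nat → Int → List (List Int)
  | 0, _ => [[]]
  | d + 1, lo =>
    (PySem.List.pyRange lo 10 1).flatMap (fun x => (pvNondec d x).map (fun rest => x :: rest))

def first_task_alt (lower_bound : Int) (upper_bound : Int) : List Int :=
  if upper_bound ≤ lower_bound then [] else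
    let hi := upper_bound - 1
    let ndigits := PySem.Str.len (PySem.Int.toStr hi)
    (PySem.List.pyRange 2 (ndigits + 1) 1).foldl (fun result d =>
      (pvNondec d.toNat 1).foldl (fun result seq =>
        if (seq.zip (PySem.List.slice seq (some 1) none)).any (fun p => p.1 == p.2) then
          let v := seq.foldl (fun v x => 10 * v + x) 0
          if lower_bound ≤ v && v < upper_bound then result ++ [v] else result
        else result) result) []

-- ===== PRECONDITION & SPEC =====
-- Pre_ excludes exactly the inputs where A raises ValueError: a nonempty range that
-- contains a negative number (int('-') on the sign character of str(i)).
def Pre_first_task (lower_bound : Int) (upper_bound : Int) : Prop :=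
  0 ≤ lower_bound ∨ upper_bound ≤ lower_bound
instance (lower_bound : Int) (upper_bound : Int) : Decidable (Pre_first_task lower_bound upper_bound) := by
  unfold Pre_first_task; infer_instance
def pvWitness_first_task : Int × Int := (100, 140)

def Spec_first_task (lower_bound : Int) (upper_bound : Int) (out : List Int) : Prop :=
  out = first_task_alt lower_bound upper_bound
instance (lower_bound : Int) (upper_bound : Int) (out : List Int) : Decidable (Spec_first_task lower_bound upper_bound out) := by
  unfold Spec_first_task; infer_instance

-- ===== CLAIM (what is proved, stated in full; the proofs are below) =====
def Claim_equal_first_task : Prop := ∀ (lower_bound : Int) (upper_bound : Int), Dom_first_task lower_bound upper_bound → Pre_first_task lower_bound upper_bound → Spec_first_task lower_bound upper_bound (first_task lower_bound upper_bound)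

-- ===== LEMMAS AND PROOFS =====
def pvDigs (n : Nat) : List Nat :=
  if _h : n < 10 then [n] else pvDigs (n / 10) ++ [n % 10]
  decreasing_by exact Nat.div_lt_self (by omega) (by omega)

-- value of an MSB-first digit list, and the digit list A extracts from str(i)
def pvVal (l : List Int) : Int := l.foldl (fun v x => 10 * v + x) 0
def pvArr (i : Int) : List Int := (pvDigs i.toNat).map (fun d : Nat => (d : Int))

theorem pvDigs_core (f n : Nat) (ds : List Char) (hf : n < f) :
    Nat.toDigitsCore 10 f n ds = (pvDigs n).map Nat.digitChar ++ ds := by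
  induction f generalizing n ds with
  | zero => omega
  | succ f ih =>
    rw [Nat.toDigitsCore]
    by_cases h : n / 10 = 0
    · rw [if_pos h, pvDigs, dif_pos (by omega)]
      simp [Nat.mod_eq_of_lt (by omega : n < 10)]
    · have hd : n / 10 < n := Nat.div_lt_self (by omega) (by omega)
      rw [if_neg h, ih (n / 10) _ (by omega)]
      conv_rhs => rw [pvDigs]
      rw [dif_neg (by omega)]
      simp
theorem pvToDigits_eq (n : Nat) : Nat.toDigits 10 n = (pvDigs n).map Nat.digitChar := by
  rw [Nat.toDigits, pvDigs_core (n+1) n [] (by omega)]; simp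

theorem pvIntOfDigit_digitChar (d : Nat) (h : d < 10) : pvIntOfDigit (Nat.digitChar d) = (d : Int) := by
  interval_cases d <;> decide

theorem pvDigs_ne_nil (n : Nat) : pvDigs n ≠ [] := by
  rw [pvDigs]; split <;> simp

theorem pvDigs_lt (n : Nat) : ∀ x ∈ pvDigs n, x < 10 := by
  induction n using Nat.strong_induction_on with
  | _ n ih =>
    rw [pvDigs]; split
    · simpa using (by omega)
    · rename_i h
      intro x hx
      rcases List.mem_append.1 hx with h1 | h1
      · exact ih (n / 10) (Nat.div_lt_self (by omega) (by omega)) x h1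
      · simp at h1; omega

theorem pvDigs_head_pos (n : Nat) (h : 1 ≤ n) : ∀ x ∈ (pvDigs n).head?, 1 ≤ x := by
  induction n using Nat.strong_induction_on with
  | _ n ih =>
    rw [pvDigs]; split
    · simpa using h
    · rename_i hn
      rw [List.head?_append_of_ne_nil _ (pvDigs_ne_nil _)]
      exact ih (n / 10) (Nat.div_lt_self (by omega) (by omega)) (by omega)

theorem pvValFrom (l : List Int) (v : Int) :
    l.foldl (fun v x => 10 * v + x) v = v * 10 ^ l.length + pvVal l := by
  induction l generalizing v with
  | nil => simp [pvVal]
  | cons x t ih =>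
    simp only [List.foldl_cons, List.length_cons, pvVal]
    rw [ih (10 * v + x), ih (10 * 0 + x)]
    ring

theorem pvVal_cons (x : Int) (t : List Int) : pvVal (x :: t) = x * 10 ^ t.length + pvVal t := by
  rw [pvVal, List.foldl_cons, pvValFrom]; ring_nf

theorem pvVal_append_singleton (s : List Int) (x : Int) : pvVal (s ++ [x]) = 10 * pvVal s + x := by
  have h1 : pvVal [x] = x := by rw [pvVal]; simp
  rw [pvVal, List.foldl_append, pvValFrom, h1]
  simp only [List.length_cons, List.length_nil, zero_add, pow_one]
  rw [pvVal]; ring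

theorem pvVal_bounds (seq : List Int) (h : ∀ x ∈ seq, 0 ≤ x ∧ x ≤ 9) :
    0 ≤ pvVal seq ∧ pvVal seq < 10 ^ seq.length := by
  induction seq with
  | nil => simp [pvVal]
  | cons x t ih =>
    have hx := h x (by simp)
    have ht := ih (fun y hy => h y (by simp [hy]))
    rw [pvVal_cons]
    have hp : (0:Int) < 10 ^ t.length := by positivity
    simp only [List.length_cons, pow_succ]
    constructor
    · nlinarith [hx.1, ht.1]
    · nlinarith [hx.2, ht.2]

theorem pvVal_arr (n : Nat) : pvVal ((pvDigs n).map (fun d : Nat => (d : Int))) = n := by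
  induction n using Nat.strong_induction_on with
  | _ n ih =>
    rw [pvDigs]; split
    · simp [pvVal]
    · rename_i h
      rw [List.map_append, List.map_cons, List.map_nil, pvVal_append_singleton,
        ih (n / 10) (Nat.div_lt_self (by omega) (by omega))]
      omega

theorem pvDigs_lt_pow (n : Nat) : n < 10 ^ (pvDigs n).length := by
  induction n using Nat.strong_induction_on with
  | _ n ih =>
    rw [pvDigs]; split
    · simpa using (by omega)
    · rename_i h
      have h1 := ih (n / 10) (Nat.div_lt_self (by omega) (by omega))
      simp only [List.length_append, List.length_cons, List.length_nil, pow_succ]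
      omega

theorem pvDigs_pow_le (n : Nat) (h : 1 ≤ n) : 10 ^ ((pvDigs n).length - 1) ≤ n := by
  induction n using Nat.strong_induction_on with
  | _ n ih =>
    rw [pvDigs]; split
    · simpa using (by omega)
    · rename_i hn
      have h1 := ih (n / 10) (Nat.div_lt_self (by omega) (by omega)) (by omega)
      have h2 : 1 ≤ (pvDigs (n / 10)).length := List.length_pos_iff.2 (pvDigs_ne_nil _)
      simp only [List.length_append, List.length_cons, List.length_nil]
      have : (pvDigs (n / 10)).length + (0 + 1) - 1 = ((pvDigs (n / 10)).length - 1) + 1 := by omega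
      rw [this, pow_succ]
      omega

theorem pvDigs_len_mono (n m : Nat) (h : n ≤ m) : (pvDigs n).length ≤ (pvDigs m).length := by
  rcases Nat.eq_zero_or_pos n with h0 | h0
  · subst h0
    have : pvDigs 0 = [0] := by rw [pvDigs]; simp
    rw [this]
    simpa using List.length_pos_iff.2 (pvDigs_ne_nil m)
  · by_contra hc
    push_neg at hc
    have h1 : 10 ^ (pvDigs m).length ≤ 10 ^ ((pvDigs n).length - 1) :=
      Nat.pow_le_pow_right (by omega) (by omega)
    have h2 := pvDigs_pow_le n h0
    have h3 := pvDigs_lt_pow m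
    omega

theorem pvDigs_val (seq : List Int) (hne : seq ≠ []) (hhead : 1 ≤ seq.head hne)
    (hd : ∀ x ∈ seq, 0 ≤ x ∧ x ≤ 9) :
    (pvDigs (pvVal seq).toNat).map (fun d : Nat => (d : Int)) = seq := by
  induction seq using List.reverseRecOn with
  | nil => simp at hne
  | append_singleton s x ih =>
    rcases List.eq_nil_or_concat' s with rfl | ⟨s', y, rfl⟩
    · simp only [List.nil_append] at *
      have hx := hd x (by simp)
      have hh : 1 ≤ x := by simpa using hhead
      have hx1 : pvVal [x] = x := by rw [pvVal]; simp
      rw [hx1, pvDigs, dif_pos (by omega)]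
      simp; omega
    · -- s = s' ++ [y] nonempty
      have hsne : (s' ++ [y]) ≠ [] := by simp
      have hx := hd x (by simp)
      have hhead' : 1 ≤ (s' ++ [y]).head hsne := by
        rcases s' with _ | ⟨a, t⟩
        · simpa using hhead
        · simpa using hhead
      have hds : ∀ z ∈ s' ++ [y], 0 ≤ z ∧ z ≤ 9 := fun z hz => hd z (by simp at hz ⊢; tauto)
      have ihs := ih hsne hhead' hds
      have hvpos : 1 ≤ pvVal (s' ++ [y]) := by
        have hb := pvVal_bounds (s' ++ [y]) hds
        -- head ≥ 1 gives value ≥ 10^(len-1) ≥ 1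
        rcases s' with _ | ⟨a, t⟩
        · simp only [List.nil_append] at *
          have hy1 : pvVal [y] = y := by rw [pvVal]; simp
          have hy : 1 ≤ y := by simpa using hhead'
          rw [hy1]; exact hy
        · have : pvVal ((a :: t) ++ [y]) = a * 10 ^ ((t ++ [y]).length) + pvVal (t ++ [y]) := by
            rw [List.cons_append, pvVal_cons]
          have hb2 := pvVal_bounds (t ++ [y]) (fun z hz => hds z (by simp at hz ⊢; tauto))
          have hpow : (0:Int) < 10 ^ ((t ++ [y]).length) := by positivity
          have ha : 1 ≤ a := by simpa using hhead'
          nlinarith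
      set v := pvVal (s' ++ [y]) with hv
      rw [pvVal_append_singleton]
      have hnat : ((10 * v + x).toNat) = 10 * v.toNat + x.toNat := by omega
      have hge : ¬ ((10 * v + x).toNat < 10) := by omega
      rw [pvDigs, dif_neg hge, hnat]
      have e1 : (10 * v.toNat + x.toNat) / 10 = v.toNat := by omega
      have e2 : (10 * v.toNat + x.toNat) % 10 = x.toNat := by omega
      rw [e1, e2, List.map_append, List.map_cons, List.map_nil, ihs]
      have : (x.toNat : Int) = x := by omega
      rw [this]

theorem pvMem_nondec (d : Nat) (lo : Int) (seq : List Int) :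
    seq ∈ pvNondec d lo ↔ seq.length = d ∧ List.IsChain (· ≤ ·) (lo :: seq) ∧ ∀ x ∈ seq, x ≤ 9 := by
  induction d generalizing lo seq with
  | zero =>
    simp only [pvNondec, List.mem_singleton]
    constructor
    · rintro rfl; simp
    · rintro ⟨h1, -, -⟩; exact List.eq_nil_of_length_eq_zero h1
  | succ d ih =>
    simp only [pvNondec, List.mem_flatMap, List.mem_map]
    constructor
    · rintro ⟨x, hx, rest, hrest, rfl⟩
      rw [PySem.List.mem_pyRange_one] at hx
      rcases (ih x rest).1 hrest with ⟨hlen, hch, h9⟩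
      refine ⟨by simp [hlen], ?_, ?_⟩
      · rcases rest with _ | ⟨b, t⟩
        · simp [hx.1]
        · rw [List.isChain_cons_cons] at hch ⊢
          exact ⟨hx.1, (List.isChain_cons_cons).2 hch⟩
      · intro z hz
        rcases List.mem_cons.1 hz with rfl | hz
        · omega
        · exact h9 z hz
    · rintro ⟨hlen, hch, h9⟩
      rcases seq with _ | ⟨x, rest⟩
      · simp at hlen
      · rw [List.isChain_cons_cons] at hch
        have hx9 : x ≤ 9 := h9 x (by simp)
        refine ⟨x, PySem.List.mem_pyRange_one.2 ⟨hch.1, by omega⟩, rest, ?_, rfl⟩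
        exact (ih x rest).2 ⟨by simpa using hlen, hch.2, fun z hz => h9 z (by simp [hz])⟩

theorem pvChain_all (lo : Int) (seq : List Int) (h : List.IsChain (· ≤ ·) (lo :: seq)) :
    ∀ x ∈ seq, lo ≤ x := by
  induction seq generalizing lo with
  | nil => simp
  | cons b t ih =>
    rw [List.isChain_cons_cons] at h
    intro x hx
    rcases List.mem_cons.1 hx with rfl | hx
    · exact h.1
    · exact le_trans h.1 (ih b h.2 x hx)

theorem pvNondec_bounds (d : Nat) (lo : Int) (hlo : 0 ≤ lo) (seq : List Int)
    (hm : seq ∈ pvNondec d lo) : 0 ≤ pvVal seq ∧ pvVal seq < 10 ^ d := by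
  rcases (pvMem_nondec d lo seq).1 hm with ⟨hlen, hch, h9⟩
  have h0 : ∀ x ∈ seq, 0 ≤ x := fun x hx => le_trans hlo (pvChain_all lo seq hch x hx)
  have := pvVal_bounds seq (fun x hx => ⟨h0 x hx, h9 x hx⟩)
  rw [hlen] at this
  exact this

theorem pvNondec_pairwise (d : Nat) (lo : Int) (hlo : 0 ≤ lo) :
    (pvNondec d lo).Pairwise (fun s t => pvVal s < pvVal t) := by
  induction d generalizing lo with
  | zero => simp [pvNondec]
  | succ d ih =>
    rw [pvNondec, List.pairwise_flatMap]
    constructor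
    · intro x hx
      rw [PySem.List.mem_pyRange_one] at hx
      rw [List.pairwise_map]
      have hx0 : 0 ≤ x := le_trans hlo hx.1
      refine (ih x hx0).imp_of_mem ?_
      intro s t hs ht hst
      have hls := ((pvMem_nondec d x s).1 hs).1
      have hlt := ((pvMem_nondec d x t).1 ht).1
      rw [pvVal_cons, pvVal_cons, hls, hlt]
      omega
    · refine (PySem.List.pairwise_lt_pyRange_one lo 10).imp_of_mem ?_
      intro x y hx hy hxy v hv w hw
      rw [PySem.List.mem_pyRange_one] at hx hy
      rcases List.mem_map.1 hv with ⟨s, hs, rfl⟩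
      rcases List.mem_map.1 hw with ⟨t, ht, rfl⟩
      have hx0 : 0 ≤ x := le_trans hlo hx.1
      have hy0 : 0 ≤ y := le_trans hx0 (le_of_lt hxy)
      have hbs := pvNondec_bounds d x hx0 s hs
      have hbt := pvNondec_bounds d y hy0 t ht
      have hls := ((pvMem_nondec d x s).1 hs).1
      have hlt := ((pvMem_nondec d y t).1 ht).1
      rw [pvVal_cons, pvVal_cons, hls, hlt]
      have hp : (0:Int) < 10 ^ d := by positivity
      nlinarith

def pvNondecOK (l : List Int) : Bool := (l.zip l.tail).all (fun p => decide (p.1 ≤ p.2))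
def pvHasDbl (l : List Int) : Bool := (l.zip l.tail).any (fun p => p.1 == p.2)

theorem pvNondecOK_cons (a b : Int) (t : List Int) :
    pvNondecOK (a :: b :: t) = (decide (a ≤ b) && pvNondecOK (b :: t)) := by
  simp [pvNondecOK]

theorem pvHasDbl_cons (a b : Int) (t : List Int) :
    pvHasDbl (a :: b :: t) = ((a == b) || pvHasDbl (b :: t)) := by
  simp [pvHasDbl]

theorem pvHasDbl_short (l : List Int) (h : l.length ≤ 1) : pvHasDbl l = false := by
  rcases l with _ | ⟨a, _ | ⟨b, t⟩⟩ <;> simp_all [pvHasDbl]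

def pvJRec : List Int → Bool → Bool × Bool
  | a :: b :: t, fd =>
    let fd' := if a == b then true else fd
    if b < a then (fd', false) else pvJRec (b :: t) fd'
  | _, fd => (fd, true)

theorem pvJRec_short (l : List Int) (fd : Bool) (h : l.length ≤ 1) : pvJRec l fd = (fd, true) := by
  rcases l with _ | ⟨a, _ | ⟨b, t⟩⟩ <;> simp_all [pvJRec]

theorem pvJLoop_eq_rec (arr : List Int) : ∀ (m k : Nat) (fd : Bool), arr.length - k ≤ m →
    pvJLoop arr (PySem.List.pyRange (k : Int) ((arr.length : Int) - 1) 1) fd = pvJRec (arr.drop k) fd := by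
  intro m
  induction m with
  | zero =>
    intro k fd h
    rw [PySem.List.pyRange_one_eq_nil (by omega), List.drop_of_length_le (by omega), pvJLoop,
        pvJRec_short _ _ (by simp)]
  | succ m ih =>
    intro k fd h
    by_cases hk : (arr.length : Int) - 1 ≤ (k : Int)
    · rw [PySem.List.pyRange_one_eq_nil hk, pvJLoop,
        pvJRec_short _ _ (by simp [List.length_drop]; omega)]
    · have hk1 : k + 1 < arr.length := by omega
      have hk0 : k < arr.length := by omega
      rw [PySem.List.pyRange_one_cons (by omega), pvJLoop]
      have g1 : PySem.List.pyGetD arr ((k : Int)) 0 = arr[k] := by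
        rw [PySem.List.pyGetD_natCast]; exact List.getD_eq_getElem _ _ hk0
      have g2 : PySem.List.pyGetD arr ((k : Int) + 1) 0 = arr[k + 1] := by
        rw [show ((k : Int) + 1) = ((k + 1 : Nat) : Int) by push_cast; ring, PySem.List.pyGetD_natCast]
        exact List.getD_eq_getElem _ _ hk1
      have hdrop : arr.drop k = arr[k] :: arr[k + 1] :: arr.drop (k + 2) := by
        rw [List.drop_eq_getElem_cons hk0, List.drop_eq_getElem_cons hk1]
      rw [hdrop, pvJRec]
      simp only [g1, g2]
      by_cases hlt : arr[k + 1] < arr[k]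
      · simp [hlt]
      · simp only [if_neg hlt]
        have := ih (k + 1) (if arr[k] == arr[k + 1] then true else fd) (by omega)
        rw [show ((k : Int) + 1) = ((k + 1 : Nat) : Int) by push_cast; ring]
        rw [this, List.drop_eq_getElem_cons hk1]

theorem pvJRec_spec (l : List Int) (fd : Bool) :
    (pvJRec l fd).2 = pvNondecOK l ∧ (pvNondecOK l = true → (pvJRec l fd).1 = (fd || pvHasDbl l)) := by
  induction l generalizing fd with
  | nil => simp [pvJRec, pvNondecOK, pvHasDbl]
  | cons a t ih =>
    rcases t with _ | ⟨b, t⟩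
    · simp [pvJRec, pvNondecOK, pvHasDbl]
    · rw [pvJRec, pvNondecOK_cons, pvHasDbl_cons]
      by_cases hlt : b < a
      · simp [hlt, show ¬ a ≤ b by omega]
      · simp only [if_neg hlt]
        rcases ih (if a == b then true else fd) with ⟨h1, h2⟩
        constructor
        · rw [h1]; simp [show a ≤ b by omega]
        · intro hok
          simp only [Bool.and_eq_true] at hok
          rw [h2 hok.2]
          by_cases hab : a = b
          · simp [hab]
          · have he : (a == b) = false := by simp [hab]
            rw [he]; simp

theorem pvNondecOK_iff (l : List Int) : pvNondecOK l = true ↔ List.IsChain (· ≤ ·) l := by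
  induction l with
  | nil => simp [pvNondecOK]
  | cons a t ih =>
    rcases t with _ | ⟨b, t⟩
    · simp [pvNondecOK]
    · rw [pvNondecOK_cons, List.isChain_cons_cons, Bool.and_eq_true, decide_eq_true_iff, ih]

theorem pvJRec_main (arr : List Int) :
    ((pvJRec arr false).2 && (pvJRec arr false).1) = (pvNondecOK arr && pvHasDbl arr) := by
  rcases pvJRec_spec arr false with ⟨h1, h2⟩
  by_cases h : pvNondecOK arr = true
  · rw [h1, h, h2 h]; simp
  · rw [h1, Bool.not_eq_true] at *
    rw [h]; simp

theorem pvArray_eq (i : Int) (h : 0 ≤ i) :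
    (PySem.Int.toChars i).foldl (fun a c => a ++ [pvIntOfDigit c]) [] = pvArr i := by
  have ht : PySem.Int.toChars i = (pvDigs i.toNat).map Nat.digitChar := by
    rw [PySem.Int.toChars, if_neg (by omega), pvToDigits_eq]
  rw [ht, PySem.List.foldl_append_singleton_eq_map, List.map_map, pvArr]
  simp only [List.nil_append]
  exact List.map_congr_left (fun d hd => pvIntOfDigit_digitChar d (pvDigs_lt _ d hd))

theorem pvA_eq_filter (l u : Int) (hl : 0 ≤ l) :
    first_task l u = (PySem.List.pyRange l u 1).filter
      (fun i => pvNondecOK (pvArr i) && pvHasDbl (pvArr i)) := by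
  rw [first_task]
  rw [PySem.List.foldl_congr_mem _ _
      (fun result i => if pvNondecOK (pvArr i) && pvHasDbl (pvArr i) then result ++ [i] else result) []
      ?_]
  · rw [PySem.List.foldl_append_if_eq_filter]; simp
  · intro acc i hi
    have hi0 : 0 ≤ i := by
      rw [PySem.List.mem_pyRange_one] at hi; omega
    simp only [pvArray_eq i hi0, PySem.List.len_eq]
    have hj := pvJLoop_eq_rec (pvArr i) (pvArr i).length 0 false (by omega)
    simp only [Nat.cast_zero, List.drop_zero] at hj
    rw [hj, pvJRec_main]

theorem pvB_eq (l u : Int) (h : l < u) :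
    first_task_alt l u =
      ((PySem.List.pyRange 2 ((PySem.Str.len (PySem.Int.toStr (u - 1))) + 1) 1).flatMap
        (fun d => ((pvNondec d.toNat 1).filter pvHasDbl).map pvVal)).filter
          (fun v => l ≤ v && v < u) := by
  rw [first_task_alt, if_neg (by omega)]
  simp only
  have hbody : ∀ (dI : Int) (res : List Int),
      (pvNondec dI.toNat 1).foldl (fun result seq =>
        if (seq.zip (PySem.List.slice seq (some 1) none)).any (fun p => p.1 == p.2) then
          let v := seq.foldl (fun v x => 10 * v + x) 0
          if l ≤ v && v < u then result ++ [v] else result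
        else result) res
      = res ++ ((pvNondec dI.toNat 1).filter
          (fun seq => pvHasDbl seq && (l ≤ pvVal seq && pvVal seq < u))).map pvVal := by
    intro dI res
    rw [← PySem.List.foldl_append_if (fun seq => pvHasDbl seq && (l ≤ pvVal seq && pvVal seq < u)) pvVal]
    apply PySem.List.foldl_congr_mem
    intro acc seq _
    rw [PySem.List.slice_from_one]
    show (if pvHasDbl seq = true then _ else acc) = _
    by_cases h1 : pvHasDbl seq = true
    · rw [if_pos h1]
      show (if (l ≤ pvVal seq && pvVal seq < u) = true then acc ++ [pvVal seq] else acc) = _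
      by_cases h2 : (l ≤ pvVal seq && pvVal seq < u) = true
      · rw [if_pos h2, if_pos (by rw [h1, h2]; rfl)]
      · rw [if_neg h2, if_neg (by simp_all)]
    · rw [if_neg h1, if_neg (by simp_all)]
  calc (PySem.List.pyRange 2 (PySem.Str.len (PySem.Int.toStr (u - 1)) + 1) 1).foldl _ []
      = (PySem.List.pyRange 2 (PySem.Str.len (PySem.Int.toStr (u - 1)) + 1) 1).foldl
          (fun res dI => res ++ ((pvNondec dI.toNat 1).filter
            (fun seq => pvHasDbl seq && (l ≤ pvVal seq && pvVal seq < u))).map pvVal) [] := by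
        apply PySem.List.foldl_congr_mem
        intro acc dI _
        exact hbody dI acc
    _ = _ := by
        rw [PySem.List.foldl_append_eq_flatMap]
        rw [List.filter_flatMap]
        simp only [List.nil_append]
        congr 1
        funext dI
        rw [List.filter_map]
        congr 1
        rw [List.filter_filter]
        congr 1
        funext seq
        simp only [Function.comp_apply]
        rw [Bool.and_comm]

theorem pvVal_nonneg (seq : List Int) (h0 : ∀ y ∈ seq, 0 ≤ y) : 0 ≤ pvVal seq := by
  induction seq with
  | nil => simp [pvVal]
  | cons a t ih =>
    rw [pvVal_cons]
    have ha := h0 a (by simp)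
    have ht := ih (fun y hy => h0 y (by simp [hy]))
    have : (0:Int) < 10 ^ t.length := by positivity
    nlinarith

theorem pvVal_ge (x : Int) (seq : List Int) (hx : 1 ≤ x) (h0 : ∀ y ∈ seq, 0 ≤ y) :
    10 ^ seq.length ≤ pvVal (x :: seq) := by
  rw [pvVal_cons]
  have h1 := pvVal_nonneg seq h0
  have : (0:Int) < 10 ^ seq.length := by positivity
  nlinarith

theorem pvEqOfPairwise (l1 l2 : List Int) (h1 : l1.Pairwise (· < ·)) (h2 : l2.Pairwise (· < ·))
    (h : ∀ x, x ∈ l1 ↔ x ∈ l2) : l1 = l2 := by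
  have n1 : l1.Nodup := h1.imp (fun h => ne_of_lt h)
  have n2 : l2.Nodup := h2.imp (fun h => ne_of_lt h)
  have hp : l1.Perm l2 := (List.perm_ext_iff_of_nodup n1 n2).2 h
  exact hp.eq_of_pairwise (fun a b _ _ hab hba => le_antisymm hab hba)
    (h1.imp le_of_lt) (h2.imp le_of_lt)

theorem pvStrLen_toStr (n : Int) (h : 0 ≤ n) :
    PySem.Str.len (PySem.Int.toStr n) = ((pvDigs n.toNat).length : Int) := by
  rw [PySem.Str.len_eq, PySem.Int.toList_toStr, PySem.Int.toChars, if_neg (by omega),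
    pvToDigits_eq, List.length_map]

theorem pvVal_lower (d : Nat) (seq : List Int) (hm : seq ∈ pvNondec d 1)
    (hd : 1 ≤ d) : 10 ^ (d - 1) ≤ pvVal seq := by
  rcases (pvMem_nondec d 1 seq).1 hm with ⟨hlen, hch, h9⟩
  rcases seq with _ | ⟨x, rest⟩
  · simp at hlen; omega
  · rw [List.isChain_cons_cons] at hch
    have h0 : ∀ y ∈ rest, 0 ≤ y := by
      intro y hy
      have := pvChain_all x rest (by
        rcases rest with _ | ⟨b, t⟩
        · simp
        · exact hch.2) y hy
      omega
    have := pvVal_ge x rest hch.1 h0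
    have hr : rest.length = d - 1 := by simp at hlen; omega
    rw [hr] at this
    exact this

theorem pvCand_pairwise (N : Int) :
    ((PySem.List.pyRange 2 (N + 1) 1).flatMap
      (fun d => ((pvNondec d.toNat 1).filter pvHasDbl).map pvVal)).Pairwise (· < ·) := by
  rw [List.pairwise_flatMap]
  constructor
  · intro d _
    rw [List.pairwise_map]
    exact ((pvNondec_pairwise d.toNat 1 (by norm_num)).filter _)
  · refine (PySem.List.pairwise_lt_pyRange_one 2 (N + 1)).imp_of_mem ?_
    intro d1 d2 hd1 hd2 hlt v hv w hw
    rw [PySem.List.mem_pyRange_one] at hd1 hd2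
    rcases List.mem_map.1 hv with ⟨s, hs, rfl⟩
    rcases List.mem_map.1 hw with ⟨t, ht, rfl⟩
    rw [List.mem_filter] at hs ht
    have hbs := pvNondec_bounds d1.toNat 1 (by norm_num) s hs.1
    have hbt := pvVal_lower d2.toNat t ht.1 (by omega)
    have hpow : (10:Int) ^ d1.toNat ≤ 10 ^ (d2.toNat - 1) := by
      apply pow_le_pow_right₀ (by norm_num)
      omega
    omega

theorem pvP_of_cand (d : Int) (seq : List Int) (hd : 2 ≤ d)
    (hm : seq ∈ pvNondec d.toNat 1) (hdb : pvHasDbl seq = true) :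
    pvArr (pvVal seq) = seq ∧ pvNondecOK seq = true := by
  rcases (pvMem_nondec d.toNat 1 seq).1 hm with ⟨hlen, hch, h9⟩
  have hne : seq ≠ [] := by
    intro h; subst h; simp at hlen; omega
  have hch' : List.IsChain (· ≤ ·) seq := by
    rcases seq with _ | ⟨a, _ | ⟨b, t⟩⟩
    · simp
    · simp
    · exact (List.isChain_cons_cons.1 hch).2
  have hhead : 1 ≤ seq.head hne := by
    rcases seq with _ | ⟨a, t⟩
    · simp at hne
    · rcases t with _ | ⟨b, t⟩ <;> simp_all [List.isChain_cons_cons]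
  have h09 : ∀ x ∈ seq, 0 ≤ x ∧ x ≤ 9 := by
    intro x hx
    have := pvChain_all 1 seq hch x hx
    exact ⟨by omega, h9 x hx⟩
  exact ⟨pvDigs_val seq hne hhead h09, (pvNondecOK_iff seq).2 hch'⟩

theorem pvCand_of_P (u x : Int) (hx : 0 ≤ x) (hxu : x < u)
    (hP : (pvNondecOK (pvArr x) && pvHasDbl (pvArr x)) = true) :
    ∃ d ∈ PySem.List.pyRange 2 (((pvDigs (u - 1).toNat).length : Int) + 1) 1,
      ∃ seq ∈ (pvNondec d.toNat 1).filter pvHasDbl, pvVal seq = x := by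
  rw [Bool.and_eq_true] at hP
  set n := x.toNat with hn
  have hlen2 : 2 ≤ (pvArr x).length := by
    by_contra hc
    rw [pvHasDbl_short _ (by omega)] at hP
    exact absurd hP.2 (by simp)
  have hlenD : (pvArr x).length = (pvDigs n).length := by simp [pvArr, ← hn]
  have hn10 : 10 ≤ n := by
    by_contra hc
    rw [pvDigs, dif_pos (by omega)] at hlenD
    simp at hlenD; omega
  refine ⟨((pvArr x).length : Int), ?_, pvArr x, ?_, ?_⟩
  · rw [PySem.List.mem_pyRange_one]
    constructor
    · exact_mod_cast hlen2
    · have hmono := pvDigs_len_mono n (u - 1).toNat (by omega)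
      rw [hlenD]
      omega
  · rw [List.mem_filter]
    refine ⟨?_, hP.2⟩
    rw [Int.toNat_natCast]
    apply (pvMem_nondec _ 1 _).2
    refine ⟨rfl, ?_, ?_⟩
    · rcases he : pvArr x with _ | ⟨a, t⟩
      · simp
      · rw [List.isChain_cons_cons]
        constructor
        · -- head of pvArr x is first digit, ≥ 1 since n ≥ 10 ≥ 1
          have hh := pvDigs_head_pos n (by omega)
          rcases hdig : pvDigs n with _ | ⟨d0, ds⟩
          · exact absurd hdig (pvDigs_ne_nil n)
          · have : pvArr x = (d0 : Int) :: ds.map (fun d : Nat => (d : Int)) := by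
              rw [pvArr, ← hn, hdig, List.map_cons]
            rw [this] at he
            have ha : a = (d0 : Int) := by
              injection he with h1 _
              exact h1.symm
            have h1 : 1 ≤ d0 := hh d0 (by rw [hdig]; rfl)
            rw [ha]
            exact_mod_cast h1
        · have := (pvNondecOK_iff _).1 hP.1
          rw [he] at this
          rcases t with _ | ⟨b, t⟩
          · simp
          · exact this
    · intro z hz
      rw [pvArr, List.mem_map] at hz
      rcases hz with ⟨dz, hdz, rfl⟩
      have := pvDigs_lt _ dz hdz
      omega
  · rw [show pvArr x = (pvDigs n).map (fun d : Nat => (d : Int)) from rfl, pvVal_arr]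
    omega

theorem pvMain (l u : Int) (hl : 0 ≤ l) (hu : l < u) : first_task l u = first_task_alt l u := by
  rw [pvA_eq_filter l u hl, pvB_eq l u hu]
  rw [pvStrLen_toStr (u - 1) (by omega)]
  apply pvEqOfPairwise
  · exact (PySem.List.pairwise_lt_pyRange_one l u).filter _
  · exact (pvCand_pairwise _).filter _
  · intro x
    rw [List.mem_filter, List.mem_filter, PySem.List.mem_pyRange_one]
    constructor
    · rintro ⟨⟨hlx, hxu⟩, hP⟩
      refine ⟨?_, by simp [hlx, hxu]⟩
      rw [List.mem_flatMap]
      rcases pvCand_of_P u x (by omega) hxu hP with ⟨d, hd, seq, hseq, hval⟩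
      exact ⟨d, hd, List.mem_map.2 ⟨seq, hseq, hval⟩⟩
    · rintro ⟨hmem, hb⟩
      simp only [Bool.and_eq_true, decide_eq_true_iff] at hb
      refine ⟨⟨hb.1, hb.2⟩, ?_⟩
      rw [List.mem_flatMap] at hmem
      rcases hmem with ⟨d, hd, hv⟩
      rcases List.mem_map.1 hv with ⟨seq, hseq, rfl⟩
      rw [List.mem_filter] at hseq
      rw [PySem.List.mem_pyRange_one] at hd
      rcases pvP_of_cand d seq hd.1 hseq.1 hseq.2 with ⟨harr, hok⟩
      rw [harr, Bool.and_eq_true]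
      exact ⟨hok, hseq.2⟩

-- ===== VERDICT (by name: the statement is the Claim_ definition above) =====
theorem first_task_spec : Claim_equal_first_task := by
  intro l u _ hpre
  unfold Pre_first_task at hpre
  unfold Spec_first_task
  by_cases hle : u ≤ l
  · rw [first_task, PySem.List.pyRange_one_eq_nil hle, first_task_alt, if_pos hle]
    rfl
  · have hl : 0 ≤ l := by omega
    exact pvMain l u hl (by omega)
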